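-- pv_equiv track=rewrite | github.com/genometechlab/RNA002_vs_RNA004 | figure1/data_prep_scripts/alignment_stats_multiprocess.py | sum_cigar_components
-- ===== SOURCE A (Python) =====
-- def sum_cigar_components(parsed_cigar):
--     n_count = 0; m_count = 0; s_count = 0; h_count = 0; d_count = 0; i_count = 0
--     for element in parsed_cigar:
--         if element[1] == 'M':
--             m_count += element[0]
--         elif element[1] == 'S':
--             s_count += element[0]
--         elif element[1] == 'H':
--             h_count += element[0]
--         elif element[1] == 'D':
--             d_count += element[0]
--         elif element[1] == 'I':
--             i_count += element[0]
--         elif element[1] == 'N':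
--             n_count += element[0]
--     return (n_count, m_count, s_count, h_count, d_count, i_count)
-- ===== SOURCE B (Python) =====
-- def sum_cigar_components(parsed_cigar):
--     def total(op):
--         return sum(e[0] for e in parsed_cigar if e[1] == op)
--     return (total('N'), total('M'), total('S'),
--             total('H'), total('D'), total('I'))
-- ===== Notes on version B (the rewrite author's own statement) =====
-- stated objective: simpler
-- what changed: Replaces the single pass with a six-way mutable-accumulator branch chain by one small helper that sums the lengths of a given op, applied once per op (six independent filtered sums, no mutable state).
import Mathlib
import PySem

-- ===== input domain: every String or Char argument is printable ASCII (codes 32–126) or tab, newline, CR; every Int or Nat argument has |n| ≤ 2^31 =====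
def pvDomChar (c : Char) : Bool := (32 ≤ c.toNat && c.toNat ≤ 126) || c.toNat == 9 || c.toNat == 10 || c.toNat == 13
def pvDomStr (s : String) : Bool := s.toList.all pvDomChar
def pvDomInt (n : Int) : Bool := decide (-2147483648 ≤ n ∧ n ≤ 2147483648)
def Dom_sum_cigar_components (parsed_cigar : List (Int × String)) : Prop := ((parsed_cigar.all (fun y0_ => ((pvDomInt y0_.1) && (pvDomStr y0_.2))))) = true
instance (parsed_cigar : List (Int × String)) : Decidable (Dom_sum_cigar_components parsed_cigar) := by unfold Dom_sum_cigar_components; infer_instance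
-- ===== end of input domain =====

-- B replaces A's one-pass six-accumulator branch chain by six independent filtered sums (simpler).

-- ===== PORT A =====
-- literal port of A: one fold carrying the six counters, branches in A's order
def pvStepA : (Int × Int × Int × Int × Int × Int) → (Int × String) → (Int × Int × Int × Int × Int × Int)
  | (n, m, s, h, d, i), element =>
      if element.2 = "M" then (n, m + element.1, s, h, d, i)
      else if element.2 = "S" then (n, m, s + element.1, h, d, i)
      else if element.2 = "H" then (n, m, s, h + element.1, d, i)
      else if element.2 = "D" then (n, m, s, h, d + element.1, i)
      else if element.2 = "I" then (n, m, s, h, d, i + element.1)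
      else if element.2 = "N" then (n + element.1, m, s, h, d, i)
      else (n, m, s, h, d, i)

def sum_cigar_components (parsed_cigar : List (Int × String)) : Int × Int × Int × Int × Int × Int :=
  parsed_cigar.foldl pvStepA (0, 0, 0, 0, 0, 0)

-- ===== PORT B =====
-- port of B's helper: sum of lengths whose op equals `op`
def pvTotal (parsed_cigar : List (Int × String)) (op : String) : Int :=
  ((parsed_cigar.filter (fun e => e.2 = op)).map (fun e => e.1)).sum

def sum_cigar_components_alt (parsed_cigar : List (Int × String)) : Int × Int × Int × Int × Int × Int :=
  (pvTotal parsed_cigar "N", pvTotal parsed_cigar "M", pvTotal parsed_cigar "S",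
   pvTotal parsed_cigar "H", pvTotal parsed_cigar "D", pvTotal parsed_cigar "I")

-- ===== PRECONDITION & SPEC =====
def Spec_sum_cigar_components (parsed_cigar : List (Int × String)) (out : Int × Int × Int × Int × Int × Int) : Prop := out = sum_cigar_components_alt parsed_cigar
instance (parsed_cigar : List (Int × String)) (out : Int × Int × Int × Int × Int × Int) : Decidable (Spec_sum_cigar_components parsed_cigar out) := by unfold Spec_sum_cigar_components; infer_instance

-- ===== CLAIM (what is proved, stated in full; the proofs are below) =====
def Claim_equal_sum_cigar_components : Prop := ∀ (parsed_cigar : List (Int × String)), Dom_sum_cigar_components parsed_cigar → Spec_sum_cigar_components parsed_cigar (sum_cigar_components parsed_cigar)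

-- ===== LEMMAS AND PROOFS =====

lemma pvTotal_cons (e : Int × String) (l : List (Int × String)) (op : String) :
    pvTotal (e :: l) op = (if e.2 = op then e.1 else 0) + pvTotal l op := by
  simp [pvTotal, List.filter_cons]
  split_ifs <;> simp

lemma sum_cigar_foldl (l : List (Int × String)) (n m s h d i : Int) :
    l.foldl pvStepA (n, m, s, h, d, i)
    = (n + pvTotal l "N", m + pvTotal l "M", s + pvTotal l "S",
       h + pvTotal l "H", d + pvTotal l "D", i + pvTotal l "I") := by
  induction l generalizing n m s h d i with
  | nil => simp [pvTotal]
  | cons e t ih =>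
    obtain ⟨v, op⟩ := e
    simp only [List.foldl_cons, pvStepA, pvTotal_cons]
    split_ifs with h1 h2 h3 h4 h5 h6 <;> (rw [ih]; clear ih; simp_all; try ring_nf)

-- ===== VERDICT (by name: the statement is the Claim_ definition above) =====
theorem sum_cigar_components_spec : Claim_equal_sum_cigar_components := by
  intro l _
  show sum_cigar_components l = sum_cigar_components_alt l
  simp [sum_cigar_components, sum_cigar_components_alt, sum_cigar_foldl]
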